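-- pv_equiv track=rewrite | github.com/yashodalasith/Q-AnalyzerX | code-analysis-engine/modules/parsers/base_parser.py | count_loops
-- ===== SOURCE A (Python) =====
-- def count_loops(code: str) -> int:
--     """Count loop statements"""
--     loop_keywords = ['for', 'while', 'repeat', 'loop']
--     count = 0
--     for line in code.split('\n'):
--         line_lower = line.strip().lower()
--         if any(line_lower.startswith(kw) for kw in loop_keywords):
--             count += 1
--     return count
-- ===== SOURCE B (Python) =====
-- def count_loops(code: str) -> int:
--     """Count loop statements"""
--     kws = ('for', 'while', 'repeat', 'loop')
--     count = 0
--     rest = code.lower()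
--     while True:
--         cur = rest.lstrip(' \t\r\x0b\x0c')
--         if cur.startswith(kws):
--             count += 1
--         nl = cur.find('\n')
--         if nl < 0:
--             return count
--         rest = cur[nl + 1:]
-- ===== Notes on version B (the rewrite author's own statement) =====
-- stated objective: alternative
-- what changed: Instead of splitting the code into a list of lines and stripping/lowercasing each line before testing the four keywords, B lowercases the text once and makes a single left-to-right scan that skips horizontal whitespace at each line start, tests the keywords in place, and jumps to the next newline.
import Mathlib
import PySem

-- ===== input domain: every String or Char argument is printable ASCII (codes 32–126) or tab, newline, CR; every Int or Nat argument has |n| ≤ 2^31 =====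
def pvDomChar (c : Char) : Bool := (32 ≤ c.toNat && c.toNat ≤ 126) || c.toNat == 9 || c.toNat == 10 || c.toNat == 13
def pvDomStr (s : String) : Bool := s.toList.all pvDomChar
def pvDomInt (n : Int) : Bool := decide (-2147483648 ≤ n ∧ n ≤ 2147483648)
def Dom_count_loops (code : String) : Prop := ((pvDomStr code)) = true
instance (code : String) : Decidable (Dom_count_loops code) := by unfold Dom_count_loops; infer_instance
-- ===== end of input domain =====

-- B replaces A's split-every-line-then-strip/lower-each-line loop by a single left-to-right scan
-- of the once-lowercased text that skips horizontal whitespace at each line start, tests the four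
-- keywords in place, and jumps to the next newline (objective: alternative).

-- ===== PORT A =====
-- A's `code.split('\n')` is ported by PySem.Chars.splitOn on the code points (exact for sep = "\n").
def count_loops (code : String) : Int :=
  let loop_keywords : List (List Char) := ["for".toList, "while".toList, "repeat".toList, "loop".toList]
  (PySem.Chars.splitOn code.toList ['\n']).foldl
    (fun count line =>
      let line_lower := PySem.Chars.lower (PySem.Chars.strip line)
      if loop_keywords.any (fun kw => PySem.Chars.startswith line_lower kw) then count + 1 else count)
    0

-- ===== PORT B =====
-- membership in the char set ' \t\r\x0b\x0c' of Source B, by code point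
def pvIsHWS (c : Char) : Bool :=
  c.toNat == 32 || c.toNat == 9 || c.toNat == 13 || c.toNat == 11 || c.toNat == 12

-- cur.startswith(('for', 'while', 'repeat', 'loop'))
def pvKwHit (cur : List Char) : Bool :=
  PySem.Chars.startswith cur "for".toList || PySem.Chars.startswith cur "while".toList ||
    PySem.Chars.startswith cur "repeat".toList || PySem.Chars.startswith cur "loop".toList

-- the while-loop of Source B; `rest.lstrip(' \t\r\x0b\x0c')` is ported as dropWhile pvIsHWS (exact)
def pvScan (count : Int) (rest : List Char) : Int :=
  let cur := rest.dropWhile pvIsHWS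
  let count' := if pvKwHit cur then count + 1 else count
  let nl := PySem.Chars.find cur ['\n']
  if nl < 0 then count'
  else pvScan count' (cur.drop (nl.toNat + 1))
termination_by rest.length
decreasing_by
  simp only [cur, nl] at *
  have h1 : (rest.dropWhile pvIsHWS).length ≤ rest.length := List.length_dropWhile_le _ _
  have h2 : ['\n'] <:+: rest.dropWhile pvIsHWS :=
    (PySem.Chars.find_nonneg_iff (rest.dropWhile pvIsHWS) ['\n']).mp (by omega)
  have h4 : 1 ≤ (rest.dropWhile pvIsHWS).length := by
    cases hq : rest.dropWhile pvIsHWS with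
    | nil => rw [hq] at h2; exact absurd (List.eq_nil_of_infix_nil h2) (by simp)
    | cons a t => simp [hq]
  simp only [List.length_drop]
  omega

def count_loops_alt (code : String) : Int :=
  pvScan 0 (PySem.Chars.lower code.toList)

-- ===== PRECONDITION & SPEC =====
def Spec_count_loops (code : String) (out : Int) : Prop := out = count_loops_alt code
instance (code : String) (out : Int) : Decidable (Spec_count_loops code out) := by unfold Spec_count_loops; infer_instance

-- ===== CLAIM (what is proved, stated in full; the proofs are below) =====
def Claim_equal_count_loops : Prop := ∀ (code : String), Dom_count_loops code → Spec_count_loops code (count_loops code)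

-- ===== LEMMAS AND PROOFS =====

-- the list of lines of cs (split at '\n'), structurally
def pvLines (cs : List Char) : List (List Char) :=
  match h : cs.dropWhile (· ≠ '\n') with
  | [] => [cs.takeWhile (· ≠ '\n')]
  | _ :: tl => cs.takeWhile (· ≠ '\n') :: pvLines tl
termination_by cs.length
decreasing_by
  have h1 : (cs.dropWhile (· ≠ '\n')).length ≤ cs.length := List.length_dropWhile_le _ _
  rw [h] at h1; simp at h1; omega

-- A's per-line test
def pvHit (line : List Char) : Bool :=
  (["for".toList, "while".toList, "repeat".toList, "loop".toList]).any
    (fun kw => PySem.Chars.startswith (PySem.Chars.lower (PySem.Chars.strip line)) kw)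

theorem pvChar_toNat_inj {a b : Char} (h : a.toNat = b.toNat) : a = b := by
  apply Char.ext
  exact UInt32.toNat_inj.mp h

theorem pvLines_ne_nil (cs : List Char) : pvLines cs ≠ [] := by
  rw [pvLines]; split <;> simp

theorem pvLines_nil : pvLines [] = [[]] := by
  rw [pvLines]; split <;> simp_all

theorem pvLines_nl (rest : List Char) : pvLines ('\n' :: rest) = [] :: pvLines rest := by
  rw [pvLines]
  have hd : ('\n' :: rest).dropWhile (· ≠ '\n') = '\n' :: rest := by simp [List.dropWhile_cons]
  have ht : ('\n' :: rest).takeWhile (· ≠ '\n') = [] := by simp [List.takeWhile_cons]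
  split <;> rename_i heq
  · rw [hd] at heq; cases heq
  · rw [hd] at heq; cases heq; rw [ht]

theorem pvLines_cons {c : Char} (rest : List Char) (hc : c ≠ '\n') {p : List Char}
    {ps : List (List Char)} (hps : pvLines rest = p :: ps) :
    pvLines (c :: rest) = (c :: p) :: ps := by
  have hd : (c :: rest).dropWhile (· ≠ '\n') = rest.dropWhile (· ≠ '\n') := by
    simp [hc]
  have ht : (c :: rest).takeWhile (· ≠ '\n') = c :: rest.takeWhile (· ≠ '\n') := by
    simp [hc]
  rw [pvLines]
  split <;> rename_i heq <;> rw [hd] at heq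
  · have hrest : pvLines rest = [rest.takeWhile (· ≠ '\n')] := by
      rw [pvLines]
      split <;> rename_i heq2
      · rfl
      · rw [heq] at heq2; cases heq2
    rw [hrest] at hps
    injection hps with h1 h2
    rw [ht, h1, ← h2]
  · rename_i x tl
    have hrest : pvLines rest = rest.takeWhile (· ≠ '\n') :: pvLines tl := by
      rw [pvLines]
      split <;> rename_i heq2
      · rw [heq2] at heq; cases heq
      · rename_i y tl2
        rw [heq2] at heq
        injection heq with e1 e2
        rw [e2]
    rw [hrest] at hps
    injection hps with h1 h2
    rw [ht, h1, h2]

theorem splitOn_go_spec : ∀ (fuel : Nat) (s cur : List Char) (acc : List (List Char)),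
    s.length < fuel →
    PySem.Chars.splitOn.go ['\n'] fuel s cur acc
      = acc.reverse ++ (match pvLines s with
          | p :: ps => (cur.reverse ++ p) :: ps
          | [] => []) := by
  intro fuel
  induction fuel with
  | zero => intro s cur acc h; omega
  | succ f ih =>
    intro s cur acc h
    rw [PySem.Chars.splitOn.go.eq_def]
    cases s with
    | nil =>
      rw [pvLines_nil]; simp
    | cons c rest =>
      by_cases hc : c = '\n'
      · subst hc
        have hpre : List.isPrefixOf ['\n'] ('\n' :: rest) = true := by
          simp [List.isPrefixOf]
        simp only [hpre, if_true, List.length_cons, List.length_nil, List.drop_succ_cons,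
          List.drop_zero]
        rw [ih rest [] (cur.reverse :: acc) (by simp at h; omega)]
        obtain ⟨p, ps, hps⟩ : ∃ p ps, pvLines rest = p :: ps := by
          cases hq : pvLines rest with
          | nil => exact absurd hq (pvLines_ne_nil rest)
          | cons a b => exact ⟨a, b, rfl⟩
        rw [pvLines_nl, hps]
        simp
      · have hpre : List.isPrefixOf ['\n'] (c :: rest) = false := by
          simp [List.isPrefixOf]; intro hh; exact hc hh.symm
        simp only [hpre, if_false, Bool.false_eq_true]
        rw [ih rest (c :: cur) acc (by simp at h ⊢; omega)]
        obtain ⟨p, ps, hps⟩ : ∃ p ps, pvLines rest = p :: ps := by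
          cases hq : pvLines rest with
          | nil => exact absurd hq (pvLines_ne_nil rest)
          | cons a b => exact ⟨a, b, rfl⟩
        rw [pvLines_cons rest hc hps, hps]
        simp

theorem splitOn_eq_pvLines (cs : List Char) :
    PySem.Chars.splitOn cs ['\n'] = pvLines cs := by
  unfold PySem.Chars.splitOn
  rw [splitOn_go_spec (cs.length + 1) cs [] [] (by omega)]
  obtain ⟨p, ps, hps⟩ : ∃ p ps, pvLines cs = p :: ps := by
    cases hq : pvLines cs with
    | nil => exact absurd hq (pvLines_ne_nil cs)
    | cons a b => exact ⟨a, b, rfl⟩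
  rw [hps]; simp

theorem foldl_count (ls : List (List Char)) : ∀ (n : Int),
    ls.foldl
      (fun count line =>
        let line_lower := PySem.Chars.lower (PySem.Chars.strip line)
        if (["for".toList, "while".toList, "repeat".toList, "loop".toList]).any
            (fun kw => PySem.Chars.startswith line_lower kw) then count + 1 else count)
      n = n + ((ls.filter pvHit).length : Int) := by
  induction ls with
  | nil => simp
  | cons l t ih =>
    intro n
    simp only [List.foldl_cons, List.filter_cons, pvHit]
    split <;> rename_i hcond <;> simp only [hcond] at * <;> rw [ih] <;>
      simp [List.length_cons] <;> push_cast <;> ring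

theorem isupper_iff (c : Char) : PySem.Chars.isupper c = true ↔ 65 ≤ c.toNat ∧ c.toNat ≤ 90 := by
  unfold PySem.Chars.isupper
  rw [Bool.and_eq_true, decide_eq_true_iff, decide_eq_true_iff, Char.le_def, Char.le_def,
    UInt32.le_iff_toNat_le, UInt32.le_iff_toNat_le]
  exact Iff.rfl

theorem lowerChar_toNat (c : Char) :
    (PySem.Chars.lowerChar c).toNat
      = if 65 ≤ c.toNat ∧ c.toNat ≤ 90 then c.toNat + 32 else c.toNat := by
  unfold PySem.Chars.lowerChar
  by_cases h : 65 ≤ c.toNat ∧ c.toNat ≤ 90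
  · rw [if_pos ((isupper_iff c).mpr h), if_pos h, Char.toNat_ofNat,
      if_pos (Or.inl (by omega : c.toNat + 32 < 55296))]
  · rw [if_neg (fun hu => h ((isupper_iff c).mp hu)), if_neg h]

theorem lowerChar_eq_nl_iff (c : Char) : PySem.Chars.lowerChar c = '\n' ↔ c = '\n' := by
  constructor
  · intro hl
    have h1 := congrArg Char.toNat hl
    rw [lowerChar_toNat] at h1
    have h10 : ('\n' : Char).toNat = 10 := rfl
    apply pvChar_toNat_inj
    rw [h10]
    split at h1 <;> omega
  · intro hl; subst hl; rfl

theorem isspace_lowerChar (c : Char) :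
    PySem.Chars.isspace (PySem.Chars.lowerChar c) = PySem.Chars.isspace c := by
  rw [Bool.eq_iff_iff]
  unfold PySem.Chars.isspace
  simp only [Bool.or_eq_true, Bool.and_eq_true, decide_eq_true_iff]
  rw [lowerChar_toNat]
  split <;> omega

theorem dom_lowerChar (c : Char) (h : pvDomChar c = true) :
    pvDomChar (PySem.Chars.lowerChar c) = true := by
  unfold pvDomChar at *
  simp only [Bool.or_eq_true, Bool.and_eq_true, decide_eq_true_iff, beq_iff_eq] at *
  rw [lowerChar_toNat]
  split <;> omega

theorem hws_eq_isspace (c : Char) (h : pvDomChar c = true) (hnl : c ≠ '\n') :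
    pvIsHWS c = PySem.Chars.isspace c := by
  have hnl' : c.toNat ≠ 10 := fun hh => hnl (pvChar_toNat_inj (by rw [hh]; rfl))
  rw [Bool.eq_iff_iff]
  unfold pvIsHWS PySem.Chars.isspace pvDomChar at *
  simp only [Bool.or_eq_true, Bool.and_eq_true, decide_eq_true_iff, beq_iff_eq] at *
  omega

theorem dropWhile_congr' {m : List Char} {p q : Char → Bool}
    (h : ∀ c ∈ m, p c = q c) : m.dropWhile p = m.dropWhile q := by
  induction m with
  | nil => rfl
  | cons a t ih =>
    simp only [List.dropWhile_cons, h a (List.mem_cons_self ..)]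
    split
    · exact ih fun c hc => h c (List.mem_cons_of_mem _ hc)
    · rfl

theorem rstrip_decomp (d : List Char) :
    PySem.Chars.rstrip d ++ (d.reverse.takeWhile PySem.Chars.isspace).reverse = d ∧
      ∀ c ∈ (d.reverse.takeWhile PySem.Chars.isspace).reverse, PySem.Chars.isspace c = true := by
  constructor
  · unfold PySem.Chars.rstrip
    rw [← List.reverse_append, List.takeWhile_append_dropWhile, List.reverse_reverse]
  · intro c hc
    rw [List.mem_reverse] at hc
    exact List.mem_takeWhile_imp hc

theorem prefix_append_ws (kw r u : List Char)
    (hkw : ∀ c ∈ kw, PySem.Chars.isspace c = false)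
    (hu : ∀ c, u.head? = some c → PySem.Chars.isspace c = true) :
    kw <+: r ++ u ↔ kw <+: r := by
  constructor
  · intro hp
    by_cases hl : kw.length ≤ r.length
    · rw [List.prefix_iff_eq_take] at hp ⊢
      rwa [List.take_append_of_le_length hl] at hp
    · exfalso
      push_neg at hl
      have hp' := hp
      rw [List.prefix_iff_eq_take, List.take_append, List.take_of_length_le (by omega)] at hp'
      have hul : 1 ≤ u.length := by
        have hlen := congrArg List.length hp'
        simp only [List.length_append, List.length_take] at hlen
        omega
      obtain ⟨v, u', rfl⟩ : ∃ v u', u = v :: u' := by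
        cases u with
        | nil => simp at hul
        | cons a b => exact ⟨a, b, rfl⟩
      have hvkw : v ∈ kw := by
        rw [hp']
        refine List.mem_append_right _ ?_
        have hk1 : kw.length - r.length = (kw.length - r.length - 1) + 1 := by omega
        rw [hk1, List.take_succ_cons]
        exact List.mem_cons_self ..
      have h1 := hkw v hvkw
      have h2 := hu v rfl
      rw [h1] at h2
      exact absurd h2 (by simp)
  · intro hp
    exact hp.trans (List.prefix_append r u)

theorem kw_hit (kw m suffix : List Char)
    (hkw : ∀ c ∈ kw, PySem.Chars.isspace c = false) (hkwne : kw ≠ [])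
    (hm_nl : '\n' ∉ m)
    (hdom : ∀ c ∈ m, pvDomChar c = true)
    (hsuf : suffix = [] ∨ ∃ r, suffix = '\n' :: r) :
    (kw <+: (m ++ suffix).dropWhile pvIsHWS) ↔ kw <+: PySem.Chars.strip m := by
  have hmem : ∀ c ∈ m, pvIsHWS c = PySem.Chars.isspace c := fun c hc =>
    hws_eq_isspace c (hdom c hc) (fun hh => hm_nl (hh ▸ hc))
  have hd : m.dropWhile pvIsHWS = m.dropWhile PySem.Chars.isspace := dropWhile_congr' hmem
  have hsuffd : suffix.dropWhile pvIsHWS = suffix := by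
    rcases hsuf with rfl | ⟨r, rfl⟩
    · rfl
    · rw [List.dropWhile_cons, show pvIsHWS '\n' = false from rfl]
      simp
  have hsufhead : ∀ c, suffix.head? = some c → PySem.Chars.isspace c = true := by
    rcases hsuf with rfl | ⟨r, rfl⟩
    · intro c hc; simp at hc
    · intro c hc
      simp only [List.head?_cons, Option.some_inj] at hc
      subst hc; rfl
  rw [List.dropWhile_append, hd]
  unfold PySem.Chars.strip PySem.Chars.lstrip
  by_cases hde : (m.dropWhile PySem.Chars.isspace).isEmpty
  · rw [if_pos hde, hsuffd]
    rw [List.isEmpty_iff.mp hde]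
    have hr : PySem.Chars.rstrip [] = [] := rfl
    rw [hr]
    constructor
    · intro hp
      have := (prefix_append_ws kw [] suffix hkw hsufhead).mp (by simpa using hp)
      simp at this
      exact absurd this hkwne
    · intro hp
      simp at hp
      exact absurd hp hkwne
  · rw [if_neg hde]
    obtain ⟨h7a, h7b⟩ := rstrip_decomp (m.dropWhile PySem.Chars.isspace)
    constructor
    · intro hp
      have hp' : kw <+: PySem.Chars.rstrip (m.dropWhile PySem.Chars.isspace)
          ++ (((m.dropWhile PySem.Chars.isspace).reverse.takeWhile PySem.Chars.isspace).reverse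
              ++ suffix) := by
        rw [← List.append_assoc, h7a]; exact hp
      refine (prefix_append_ws kw _ _ hkw ?_).mp hp'
      intro c hc
      rw [List.head?_append] at hc
      cases hh : ((m.dropWhile PySem.Chars.isspace).reverse.takeWhile PySem.Chars.isspace).reverse.head? with
      | some v =>
        rw [hh] at hc; simp at hc
        subst hc
        exact h7b v (List.mem_of_mem_head? hh)
      | none =>
        rw [hh] at hc; simp at hc
        exact hsufhead c hc
    · intro hp
      have h2 : PySem.Chars.rstrip (m.dropWhile PySem.Chars.isspace)
          <+: m.dropWhile PySem.Chars.isspace ++ suffix :=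
        ⟨((m.dropWhile PySem.Chars.isspace).reverse.takeWhile PySem.Chars.isspace).reverse
            ++ suffix, by rw [← List.append_assoc, h7a]⟩
      exact hp.trans h2

theorem lower_strip (l : List Char) :
    PySem.Chars.lower (PySem.Chars.strip l) = PySem.Chars.strip (PySem.Chars.lower l) := by
  have hcomp : (PySem.Chars.isspace ∘ PySem.Chars.lowerChar) = PySem.Chars.isspace := by
    funext c; exact isspace_lowerChar c
  have hmapdrop : ∀ x : List Char,
      (List.map PySem.Chars.lowerChar x).dropWhile PySem.Chars.isspace
        = List.map PySem.Chars.lowerChar (x.dropWhile PySem.Chars.isspace) := by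
    intro x; rw [List.dropWhile_map, hcomp]
  unfold PySem.Chars.strip PySem.Chars.rstrip PySem.Chars.lstrip PySem.Chars.lower
  conv_rhs => rw [hmapdrop l, ← List.map_reverse, hmapdrop _, ← List.map_reverse]

theorem nl_notin_lower {l : List Char} (h : '\n' ∉ l) : '\n' ∉ PySem.Chars.lower l := by
  intro hmem
  unfold PySem.Chars.lower at hmem
  rw [List.mem_map] at hmem
  obtain ⟨c, hc, hcl⟩ := hmem
  exact h (((lowerChar_eq_nl_iff c).mp hcl) ▸ hc)

theorem pvNoSpace_for : ∀ c ∈ "for".toList, PySem.Chars.isspace c = false := by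
  intro c hc
  rw [show "for".toList = ['f', 'o', 'r'] from rfl] at hc
  simp only [List.mem_cons, List.not_mem_nil, or_false] at hc
  rcases hc with rfl | rfl | rfl <;> rfl
theorem pvNoSpace_while : ∀ c ∈ "while".toList, PySem.Chars.isspace c = false := by
  intro c hc
  rw [show "while".toList = ['w', 'h', 'i', 'l', 'e'] from rfl] at hc
  simp only [List.mem_cons, List.not_mem_nil, or_false] at hc
  rcases hc with rfl | rfl | rfl | rfl | rfl <;> rfl
theorem pvNoSpace_repeat : ∀ c ∈ "repeat".toList, PySem.Chars.isspace c = false := by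
  intro c hc
  rw [show "repeat".toList = ['r', 'e', 'p', 'e', 'a', 't'] from rfl] at hc
  simp only [List.mem_cons, List.not_mem_nil, or_false] at hc
  rcases hc with rfl | rfl | rfl | rfl | rfl | rfl <;> rfl
theorem pvNoSpace_loop : ∀ c ∈ "loop".toList, PySem.Chars.isspace c = false := by
  intro c hc
  rw [show "loop".toList = ['l', 'o', 'o', 'p'] from rfl] at hc
  simp only [List.mem_cons, List.not_mem_nil, or_false] at hc
  rcases hc with rfl | rfl | rfl | rfl <;> rfl
theorem pvNe_for : "for".toList ≠ [] := by
  rw [show "for".toList = ['f', 'o', 'r'] from rfl]; simp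
theorem pvNe_while : "while".toList ≠ [] := by
  rw [show "while".toList = ['w', 'h', 'i', 'l', 'e'] from rfl]; simp
theorem pvNe_repeat : "repeat".toList ≠ [] := by
  rw [show "repeat".toList = ['r', 'e', 'p', 'e', 'a', 't'] from rfl]; simp
theorem pvNe_loop : "loop".toList ≠ [] := by
  rw [show "loop".toList = ['l', 'o', 'o', 'p'] from rfl]; simp

theorem kwHit_eq_pvHit (pre suffix : List Char)
    (hpre : '\n' ∉ pre)
    (hdom : ∀ c ∈ pre, pvDomChar c = true)
    (hsuf : suffix = [] ∨ ∃ r, suffix = '\n' :: r) :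
    pvKwHit ((PySem.Chars.lower pre ++ suffix).dropWhile pvIsHWS) = pvHit pre := by
  have hm : '\n' ∉ PySem.Chars.lower pre := nl_notin_lower hpre
  have hdom' : ∀ c ∈ PySem.Chars.lower pre, pvDomChar c = true := by
    intro c hc
    unfold PySem.Chars.lower at hc
    rw [List.mem_map] at hc
    obtain ⟨a, ha, rfl⟩ := hc
    exact dom_lowerChar a (hdom a ha)
  have key : ∀ kw : List Char, (∀ c ∈ kw, PySem.Chars.isspace c = false) → kw ≠ [] →
      (PySem.Chars.startswith ((PySem.Chars.lower pre ++ suffix).dropWhile pvIsHWS) kw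
        = PySem.Chars.startswith (PySem.Chars.lower (PySem.Chars.strip pre)) kw) := by
    intro kw h1 h2
    rw [Bool.eq_iff_iff, PySem.Chars.startswith_iff, PySem.Chars.startswith_iff, lower_strip]
    exact kw_hit kw (PySem.Chars.lower pre) suffix h1 h2 hm hdom' hsuf
  unfold pvKwHit pvHit
  simp only [List.any_cons, List.any_nil, Bool.or_false]
  rw [key "for".toList pvNoSpace_for pvNe_for,
    key "while".toList pvNoSpace_while pvNe_while,
    key "repeat".toList pvNoSpace_repeat pvNe_repeat,
    key "loop".toList pvNoSpace_loop pvNe_loop]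
  simp [Bool.or_assoc]

theorem find_no_nl (s : List Char) (h : '\n' ∉ s) : PySem.Chars.find s ['\n'] = -1 := by
  rw [PySem.Chars.find_eq_neg_one_iff]
  intro hinf
  exact h (hinf.subset (List.mem_cons_self ..))

theorem find_go_nl (d : List Char) : ∀ (k : Nat) (u : List Char), '\n' ∉ d →
    PySem.Chars.find.go ['\n'] (d ++ '\n' :: u) k = (k : Int) + d.length := by
  induction d with
  | nil =>
    intro k u _
    rw [PySem.Chars.find.go.eq_def]
    simp [List.isPrefixOf]
  | cons c t ih =>
    intro k u hnin
    have hc : c ≠ '\n' := fun hh => hnin (hh ▸ List.mem_cons_self ..)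
    rw [PySem.Chars.find.go.eq_def]
    simp only [List.cons_append]
    have hpre : List.isPrefixOf ['\n'] (c :: (t ++ '\n' :: u)) = false := by
      simp [List.isPrefixOf]; intro hh; exact hc hh.symm
    simp only [hpre, if_false, Bool.false_eq_true]
    rw [ih (k + 1) u (fun hh => hnin (List.mem_cons_of_mem _ hh))]
    simp only [List.length_cons]
    push_cast
    ring

theorem find_nl (d u : List Char) (h : '\n' ∉ d) :
    PySem.Chars.find (d ++ '\n' :: u) ['\n'] = (d.length : Int) := by
  unfold PySem.Chars.find
  rw [find_go_nl d 0 u h]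
  simp

theorem dropWhile_eq_cons_imp {p : Char → Bool} {l : List Char} {x : Char} {xs : List Char}
    (h : l.dropWhile p = x :: xs) : p x = false := by
  induction l with
  | nil => simp at h
  | cons a t ih =>
    rw [List.dropWhile_cons] at h
    split at h
    · exact ih h
    · rename_i hpa
      cases h
      simp only [Bool.not_eq_true] at hpa
      exact hpa

theorem pvScan_main : ∀ (n : Nat) (cs : List Char), cs.length ≤ n →
    (∀ c ∈ cs, pvDomChar c = true) → ∀ (count : Int),
    pvScan count (PySem.Chars.lower cs) = count + (((pvLines cs).filter pvHit).length : Int) := by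
  intro n
  induction n with
  | zero =>
    intro cs h hdom count
    have hnil : cs = [] := List.length_eq_zero_iff.mp (by omega)
    subst hnil
    have e1 : PySem.Chars.lower [] = [] := rfl
    have e3 : pvKwHit [] = false := rfl
    have e4 : PySem.Chars.find ([] : List Char) ['\n'] = -1 := rfl
    have e5 : pvHit [] = false := rfl
    rw [e1, pvScan]
    norm_num [List.dropWhile_nil, e3, e4, e5, pvLines_nil]
  | succ n ih =>
    intro cs h hdom count
    have hpre_nl : '\n' ∉ cs.takeWhile (· ≠ '\n') := by
      intro hmem
      have := List.mem_takeWhile_imp hmem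
      simp at this
    have hpredom : ∀ c ∈ cs.takeWhile (· ≠ '\n'), pvDomChar c = true := fun c hc =>
      hdom c ((List.takeWhile_prefix _).subset hc)
    have hsplit : cs.takeWhile (· ≠ '\n') ++ cs.dropWhile (· ≠ '\n') = cs :=
      List.takeWhile_append_dropWhile
    cases hdc : cs.dropWhile (· ≠ '\n') with
    | nil =>
      have hcs : cs = cs.takeWhile (· ≠ '\n') := by
        conv_lhs => rw [← hsplit, hdc, List.append_nil]
      have hlowcs : PySem.Chars.lower cs
          = PySem.Chars.lower (cs.takeWhile (· ≠ '\n')) := congrArg _ hcs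
      rw [hlowcs, pvScan]
      have hnonl : '\n' ∉ (PySem.Chars.lower (cs.takeWhile (· ≠ '\n'))).dropWhile pvIsHWS := by
        intro hmem
        exact nl_notin_lower hpre_nl ((List.dropWhile_suffix _).subset hmem)
      have hfind : PySem.Chars.find
          ((PySem.Chars.lower (cs.takeWhile (· ≠ '\n'))).dropWhile pvIsHWS) ['\n'] = -1 :=
        find_no_nl _ hnonl
      rw [hfind, if_pos (by norm_num)]
      have hkw := kwHit_eq_pvHit (cs.takeWhile (· ≠ '\n')) [] hpre_nl hpredom (Or.inl rfl)
      rw [List.append_nil] at hkw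
      rw [hkw]
      have hlines : pvLines cs = [cs.takeWhile (· ≠ '\n')] := by
        rw [pvLines]
        split <;> rename_i heq
        · rfl
        · rw [hdc] at heq; cases heq
      rw [hlines, List.filter_cons]
      cases hph : pvHit (cs.takeWhile (· ≠ '\n')) <;> simp
    | cons c0 tl =>
      have hc0 : c0 = '\n' := by
        have := dropWhile_eq_cons_imp hdc
        simpa using this
      subst hc0
      have htldom : ∀ c ∈ tl, pvDomChar c = true := by
        intro c hc
        exact hdom c ((List.dropWhile_suffix (· ≠ '\n')).subset (hdc ▸ List.mem_cons_of_mem _ hc))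
      have htllen : tl.length ≤ n := by
        have h1 : (cs.dropWhile (· ≠ '\n')).length ≤ cs.length := List.length_dropWhile_le _ _
        rw [hdc] at h1; simp at h1; omega
      have hlow : PySem.Chars.lower cs
          = PySem.Chars.lower (cs.takeWhile (· ≠ '\n')) ++ '\n' :: PySem.Chars.lower tl := by
        conv_lhs => rw [← hsplit, hdc]
        unfold PySem.Chars.lower
        rw [List.map_append]
        simp [lowerChar_eq_nl_iff]
      -- cur = d' ++ '\n' :: lower tl
      have hcur : (PySem.Chars.lower cs).dropWhile pvIsHWS
          = (PySem.Chars.lower (cs.takeWhile (· ≠ '\n'))).dropWhile pvIsHWS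
              ++ '\n' :: PySem.Chars.lower tl := by
        rw [hlow, List.dropWhile_append]
        by_cases he : ((PySem.Chars.lower (cs.takeWhile (· ≠ '\n'))).dropWhile pvIsHWS).isEmpty
        · rw [if_pos he, List.isEmpty_iff.mp he]
          rw [List.dropWhile_cons, show pvIsHWS '\n' = false from rfl]
          simp
        · rw [if_neg he]
      have hnonl : '\n' ∉ (PySem.Chars.lower (cs.takeWhile (· ≠ '\n'))).dropWhile pvIsHWS := by
        intro hmem
        exact nl_notin_lower hpre_nl ((List.dropWhile_suffix _).subset hmem)
      rw [pvScan]
      rw [hcur, find_nl _ _ hnonl]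
      rw [if_neg (by omega)]
      have hdrop : ((PySem.Chars.lower (cs.takeWhile (· ≠ '\n'))).dropWhile pvIsHWS
            ++ '\n' :: PySem.Chars.lower tl).drop
            ((((PySem.Chars.lower (cs.takeWhile (· ≠ '\n'))).dropWhile pvIsHWS).length : Int).toNat + 1)
          = PySem.Chars.lower tl := by
        rw [Int.toNat_natCast]
        rw [show ((PySem.Chars.lower (cs.takeWhile (· ≠ '\n'))).dropWhile pvIsHWS).length + 1
            = ((PySem.Chars.lower (cs.takeWhile (· ≠ '\n'))).dropWhile pvIsHWS ++ ['\n']).length by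
          simp]
        rw [show (PySem.Chars.lower (cs.takeWhile (· ≠ '\n'))).dropWhile pvIsHWS
              ++ '\n' :: PySem.Chars.lower tl
            = ((PySem.Chars.lower (cs.takeWhile (· ≠ '\n'))).dropWhile pvIsHWS ++ ['\n'])
              ++ PySem.Chars.lower tl by simp]
        exact List.drop_left
      rw [hdrop]
      rw [ih tl htllen htldom]
      have hkw := kwHit_eq_pvHit (cs.takeWhile (· ≠ '\n')) ('\n' :: PySem.Chars.lower tl)
        hpre_nl hpredom (Or.inr ⟨_, rfl⟩)
      have hkw' : pvKwHit ((PySem.Chars.lower (cs.takeWhile (· ≠ '\n'))).dropWhile pvIsHWS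
            ++ '\n' :: PySem.Chars.lower tl) = pvHit (cs.takeWhile (· ≠ '\n')) := by
        rw [← hcur, hlow]
        exact hkw
      rw [hkw']
      have hlines : pvLines cs = cs.takeWhile (· ≠ '\n') :: pvLines tl := by
        rw [pvLines]
        split <;> rename_i heq <;> rw [hdc] at heq
        · cases heq
        · cases heq; rfl
      rw [hlines, List.filter_cons]
      cases hph : pvHit (cs.takeWhile (· ≠ '\n')) <;>
        simp only [hph, if_pos, if_neg, Bool.false_eq_true, if_true, if_false,
          List.length_cons] <;>
        push_cast <;> omega

-- ===== VERDICT (by name: the statement is the Claim_ definition above) =====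
theorem count_loops_spec : Claim_equal_count_loops := by
  intro code hdom
  unfold Spec_count_loops count_loops count_loops_alt
  rw [splitOn_eq_pvLines, foldl_count,
    pvScan_main code.toList.length code.toList le_rfl
      (by simpa [Dom_count_loops, pvDomStr, List.all_eq_true] using hdom) 0]
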